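-- pv_equiv track=rewrite | github.com/kaylaque/quranic-pipeline | src/phonemizer.py | _classify_tajweed_diff
-- ===== SOURCE A (Python) =====
-- from typing import List, Optional
--
-- def _classify_tajweed_diff(tajweed_rules: Optional[List[str]]) -> str:
--     """Map tajweed rules to the most specific diff type."""
--     if not tajweed_rules:
--         return "PHONE_SUB"
--
--     # Priority: most specific rules first
--     priority = [
--         "MEDD_WAJIB_MUTTASIL", "MEDD_LAZIM", "MEDD_JAIZ_MUNFASIL",
--         "MEDD_TABII", "MEDD_ARID_LISSUKUN",
--         "IDGHAM_GHUNNA", "IDGHAM_NO_GHUNNA", "IDGHAM_SHAFAWI",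
--         "IKHFA", "IKHFA_SHAFAWI",
--         "IQLAB", "IZHAR", "IZHAR_SHAFAWI",
--         "QALQALA_KUBRA", "QALQALA_SUGHRA",
--         "GHUNNA",
--         "LAM_SHAMSIYAH", "LAM_QAMARIYAH",
--         "TAFKHEEM",
--     ]
--
--     for rule in priority:
--         if rule in tajweed_rules:
--             # Map to the general TAJWEED_ category
--             if "MEDD" in rule:
--                 return "TAJWEED_MEDD"
--             if "IDGHAM" in rule:
--                 return "TAJWEED_IDGHAM"
--             if "IKHFA" in rule:
--                 return "TAJWEED_IKHFA"
--             if rule == "IQLAB":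
--                 return "TAJWEED_IQLAB"
--             if "IZHAR" in rule:
--                 return "TAJWEED_IZHAR"
--             if "QALQALA" in rule:
--                 return "TAJWEED_QALQALA"
--             if rule == "GHUNNA":
--                 return "TAJWEED_GHUNNA"
--             if rule == "TAFKHEEM":
--                 return "TAJWEED_TAFKHEEM"
--             if "LAM" in rule:
--                 return "TAJWEED_IDGHAM"  # Lam Shamsiyah is a form of assimilation
--
--     return "PHONE_SUB"
-- ===== SOURCE B (Python) =====
-- def _classify_tajweed_diff(tajweed_rules):
--     """Map tajweed rules to the most specific diff type."""
--     if not tajweed_rules: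
--         return "PHONE_SUB"
--     table = {
--         "MEDD_WAJIB_MUTTASIL": (0, "TAJWEED_MEDD"),
--         "MEDD_LAZIM": (1, "TAJWEED_MEDD"),
--         "MEDD_JAIZ_MUNFASIL": (2, "TAJWEED_MEDD"),
--         "MEDD_TABII": (3, "TAJWEED_MEDD"),
--         "MEDD_ARID_LISSUKUN": (4, "TAJWEED_MEDD"),
--         "IDGHAM_GHUNNA": (5, "TAJWEED_IDGHAM"),
--         "IDGHAM_NO_GHUNNA": (6, "TAJWEED_IDGHAM"),
--         "IDGHAM_SHAFAWI": (7, "TAJWEED_IDGHAM"),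
--         "IKHFA": (8, "TAJWEED_IKHFA"),
--         "IKHFA_SHAFAWI": (9, "TAJWEED_IKHFA"),
--         "IQLAB": (10, "TAJWEED_IQLAB"),
--         "IZHAR": (11, "TAJWEED_IZHAR"),
--         "IZHAR_SHAFAWI": (12, "TAJWEED_IZHAR"),
--         "QALQALA_KUBRA": (13, "TAJWEED_QALQALA"),
--         "QALQALA_SUGHRA": (14, "TAJWEED_QALQALA"),
--         "GHUNNA": (15, "TAJWEED_GHUNNA"),
--         "LAM_SHAMSIYAH": (16, "TAJWEED_IDGHAM"),
--         "LAM_QAMARIYAH": (17, "TAJWEED_IDGHAM"),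
--         "TAFKHEEM": (18, "TAJWEED_TAFKHEEM"),
--     }
--     best = None
--     for rule in tajweed_rules:
--         hit = table.get(rule)
--         if hit is not None and (best is None or hit[0] < best[0]):
--             best = hit
--     return best[1] if best is not None else "PHONE_SUB"
-- ===== Notes on version B (the rewrite author's own statement) =====
-- stated objective: alternative
-- what changed: Instead of scanning the fixed 19-rule priority list with a membership test and a substring-based if/return chain per rule, B makes a single pass over the input rules against a precomputed rule -> (priority index, category) table, keeping the hit with the smallest index.
import Mathlib
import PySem

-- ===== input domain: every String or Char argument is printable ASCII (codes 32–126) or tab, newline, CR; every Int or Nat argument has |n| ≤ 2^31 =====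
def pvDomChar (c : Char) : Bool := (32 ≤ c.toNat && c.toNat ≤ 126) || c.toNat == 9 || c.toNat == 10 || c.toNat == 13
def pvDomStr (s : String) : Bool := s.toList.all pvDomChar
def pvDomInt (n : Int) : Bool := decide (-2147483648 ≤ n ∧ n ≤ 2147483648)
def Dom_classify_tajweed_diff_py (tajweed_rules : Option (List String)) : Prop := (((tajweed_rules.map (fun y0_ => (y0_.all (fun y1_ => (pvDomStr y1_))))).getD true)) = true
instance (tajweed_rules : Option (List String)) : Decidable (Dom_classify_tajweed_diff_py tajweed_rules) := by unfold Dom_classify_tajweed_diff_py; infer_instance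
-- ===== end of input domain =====

-- B replaces A's scan of the fixed priority list (membership test per rule) by a single pass over the
-- input rules against a rule -> (priority index, category) lookup table, keeping the minimal-index hit.


-- ===== PORT A =====
def pvPriority : List String :=
  ["MEDD_WAJIB_MUTTASIL", "MEDD_LAZIM", "MEDD_JAIZ_MUNFASIL",
   "MEDD_TABII", "MEDD_ARID_LISSUKUN",
   "IDGHAM_GHUNNA", "IDGHAM_NO_GHUNNA", "IDGHAM_SHAFAWI",
   "IKHFA", "IKHFA_SHAFAWI",
   "IQLAB", "IZHAR", "IZHAR_SHAFAWI",
   "QALQALA_KUBRA", "QALQALA_SUGHRA",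
   "GHUNNA",
   "LAM_SHAMSIYAH", "LAM_QAMARIYAH",
   "TAFKHEEM"]

-- the if/return chain of A's loop body; none = no branch fired (the Python loop continues)
def pvCatA (rule : String) : Option String :=
  if PySem.Str.isIn "MEDD" rule then some "TAJWEED_MEDD"
  else if PySem.Str.isIn "IDGHAM" rule then some "TAJWEED_IDGHAM"
  else if PySem.Str.isIn "IKHFA" rule then some "TAJWEED_IKHFA"
  else if rule = "IQLAB" then some "TAJWEED_IQLAB"
  else if PySem.Str.isIn "IZHAR" rule then some "TAJWEED_IZHAR"
  else if PySem.Str.isIn "QALQALA" rule then some "TAJWEED_QALQALA"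
  else if rule = "GHUNNA" then some "TAJWEED_GHUNNA"
  else if rule = "TAFKHEEM" then some "TAJWEED_TAFKHEEM"
  else if PySem.Str.isIn "LAM" rule then some "TAJWEED_IDGHAM"
  else none

def pvLoopA (xs : List String) : List String → String
  | [] => "PHONE_SUB"
  | r :: rest =>
    if xs.contains r then
      match pvCatA r with
      | some c => c
      | none => pvLoopA xs rest
    else pvLoopA xs rest

def classify_tajweed_diff_py (tajweed_rules : Option (List String)) : String :=
  match tajweed_rules with
  | none => "PHONE_SUB"
  | some xs => if xs.isEmpty then "PHONE_SUB" else pvLoopA xs pvPriority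

-- ===== PORT B =====
def pvTable : PySem.Dict String (Int × String) :=
  PySem.Dict.ofList
    [("MEDD_WAJIB_MUTTASIL", (0, "TAJWEED_MEDD")),
     ("MEDD_LAZIM", (1, "TAJWEED_MEDD")),
     ("MEDD_JAIZ_MUNFASIL", (2, "TAJWEED_MEDD")),
     ("MEDD_TABII", (3, "TAJWEED_MEDD")),
     ("MEDD_ARID_LISSUKUN", (4, "TAJWEED_MEDD")),
     ("IDGHAM_GHUNNA", (5, "TAJWEED_IDGHAM")),
     ("IDGHAM_NO_GHUNNA", (6, "TAJWEED_IDGHAM")),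
     ("IDGHAM_SHAFAWI", (7, "TAJWEED_IDGHAM")),
     ("IKHFA", (8, "TAJWEED_IKHFA")),
     ("IKHFA_SHAFAWI", (9, "TAJWEED_IKHFA")),
     ("IQLAB", (10, "TAJWEED_IQLAB")),
     ("IZHAR", (11, "TAJWEED_IZHAR")),
     ("IZHAR_SHAFAWI", (12, "TAJWEED_IZHAR")),
     ("QALQALA_KUBRA", (13, "TAJWEED_QALQALA")),
     ("QALQALA_SUGHRA", (14, "TAJWEED_QALQALA")),
     ("GHUNNA", (15, "TAJWEED_GHUNNA")),
     ("LAM_SHAMSIYAH", (16, "TAJWEED_IDGHAM")),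
     ("LAM_QAMARIYAH", (17, "TAJWEED_IDGHAM")),
     ("TAFKHEEM", (18, "TAJWEED_TAFKHEEM"))]

-- the loop body of B: keep the hit with the smallest priority index
def pvStep (best : Option (Int × String)) (rule : String) : Option (Int × String) :=
  match PySem.Dict.get? pvTable rule with
  | none => best
  | some hit =>
    match best with
    | none => some hit
    | some b => if hit.1 < b.1 then some hit else some b

def classify_tajweed_diff_py_alt (tajweed_rules : Option (List String)) : String :=
  match tajweed_rules with
  | none => "PHONE_SUB"
  | some xs =>
    if xs.isEmpty then "PHONE_SUB"
    else
      match xs.foldl pvStep none with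
      | some b => b.2
      | none => "PHONE_SUB"

-- ===== PRECONDITION & SPEC =====
def Spec_classify_tajweed_diff_py (tajweed_rules : Option (List String)) (out : String) : Prop := out = classify_tajweed_diff_py_alt tajweed_rules
instance (tajweed_rules : Option (List String)) (out : String) : Decidable (Spec_classify_tajweed_diff_py tajweed_rules out) := by unfold Spec_classify_tajweed_diff_py; infer_instance

-- ===== CLAIM (what is proved, stated in full; the proofs are below) =====
def Claim_equal_classify_tajweed_diff_py : Prop := ∀ (tajweed_rules : Option (List String)), Dom_classify_tajweed_diff_py tajweed_rules → Spec_classify_tajweed_diff_py tajweed_rules (classify_tajweed_diff_py tajweed_rules)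

-- ===== LEMMAS AND PROOFS =====

-- category of priority index i (proof-side table)
def pvCats : List String :=
  ["TAJWEED_MEDD", "TAJWEED_MEDD", "TAJWEED_MEDD", "TAJWEED_MEDD", "TAJWEED_MEDD",
   "TAJWEED_IDGHAM", "TAJWEED_IDGHAM", "TAJWEED_IDGHAM",
   "TAJWEED_IKHFA", "TAJWEED_IKHFA",
   "TAJWEED_IQLAB", "TAJWEED_IZHAR", "TAJWEED_IZHAR",
   "TAJWEED_QALQALA", "TAJWEED_QALQALA",
   "TAJWEED_GHUNNA",
   "TAJWEED_IDGHAM", "TAJWEED_IDGHAM",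
   "TAJWEED_TAFKHEEM"]

def pvCatT (i : Nat) : String := pvCats.getD i "PHONE_SUB"

def pvIdx (r : String) : Nat := pvPriority.idxOf r

def pvMin (b : Nat) (xs : List String) : Nat := xs.foldl (fun a r => min a (pvIdx r)) b

theorem pvPriority_length : pvPriority.length = 19 := rfl

theorem pvIdx_le (r : String) : pvIdx r ≤ 19 := by
  have h := List.idxOf_le_length (l := pvPriority) (a := r)
  simpa [pvIdx, pvPriority_length] using h

-- B's dict lookup, characterized by the index in A's priority list
theorem pvGetTable (r : String) :
    PySem.Dict.get? pvTable r =
      if pvIdx r < 19 then some ((pvIdx r : Int), pvCatT (pvIdx r)) else none := by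
  by_cases hr : r ∈ pvPriority
  · fin_cases hr <;> decide
  · have h1 : pvIdx r = 19 := by
      rw [pvIdx, ← pvPriority_length]
      exact List.idxOf_eq_length_iff.mpr hr
    have h2 : PySem.Dict.get? pvTable r = none := by
      rw [PySem.Dict.get?_eq_none_iff_not_mem_keys]
      have hk : pvTable.keys = pvPriority := by decide
      rw [hk]; exact hr
    rw [h1, h2, if_neg (by omega)]

theorem pvMin_props (xs : List String) : ∀ b : Nat,
    pvMin b xs ≤ b ∧ (pvMin b xs = b ∨ ∃ r ∈ xs, pvMin b xs = pvIdx r) ∧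
      ∀ r ∈ xs, pvMin b xs ≤ pvIdx r := by
  induction xs with
  | nil => intro b; simp [pvMin]
  | cons r rest ih =>
    intro b
    have hcons : pvMin b (r :: rest) = pvMin (min b (pvIdx r)) rest := rfl
    obtain ⟨h1, h2, h3⟩ := ih (min b (pvIdx r))
    refine ⟨?_, ?_, ?_⟩
    · rw [hcons]; omega
    · rw [hcons]
      rcases h2 with h | ⟨r', hr', he⟩
      · rcases le_total b (pvIdx r) with hbr | hbr
        · left; omega
        · right; exact ⟨r, List.mem_cons_self, by omega⟩
      · right; exact ⟨r', List.mem_cons_of_mem _ hr', he⟩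
    · intro r' hr'
      rw [hcons]
      rcases List.mem_cons.mp hr' with rfl | hm
      · omega
      · exact h3 r' hm

-- B's fold, run from a valid state, computes the minimal priority index (19 = no hit)
theorem pvFold_inv (xs : List String) : ∀ b : Nat, b ≤ 19 →
    xs.foldl pvStep (if b = 19 then none else some ((b : Int), pvCatT b)) =
      (if pvMin b xs = 19 then none else some ((pvMin b xs : Int), pvCatT (pvMin b xs))) := by
  induction xs with
  | nil => intro b hb; simp [pvMin]
  | cons r rest ih =>
    intro b hb
    have hcons : pvMin b (r :: rest) = pvMin (min b (pvIdx r)) rest := rfl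
    rw [List.foldl_cons, hcons]
    have hle := pvIdx_le r
    have hstep : ∀ m : Nat, m = min b (pvIdx r) →
        pvStep (if b = 19 then none else some ((b : Int), pvCatT b)) r =
          (if m = 19 then none else some ((m : Int), pvCatT m)) := by
      intro m hm
      unfold pvStep
      rw [pvGetTable r]
      rcases Nat.lt_or_ge (pvIdx r) 19 with hlt | hge
      · rw [if_pos hlt]
        by_cases hb19 : b = 19
        · subst hb19
          rw [if_pos rfl]
          have hmi : m = pvIdx r := by omega
          subst hmi
          rw [if_neg (by omega)]
        · rw [if_neg hb19]
          show (if ((pvIdx r : Int)) < ((b : Int)) then some (((pvIdx r) : Int), pvCatT (pvIdx r))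
                else some ((b : Int), pvCatT b)) = _
          by_cases hcb : pvIdx r < b
          · rw [if_pos (by omega : ((pvIdx r : Int)) < ((b : Int)))]
            have hmi : m = pvIdx r := by omega
            subst hmi
            rw [if_neg (by omega)]
          · rw [if_neg (by omega : ¬ ((pvIdx r : Int)) < ((b : Int)))]
            have hmi : m = b := by omega
            subst hmi
            rw [if_neg hb19]
      · rw [if_neg (by omega)]
        have hmi : m = b := by omega
        subst hmi
        rfl
    rw [hstep (min b (pvIdx r)) rfl]
    exact ih (min b (pvIdx r)) (by omega)

-- every priority rule fires some branch of A's if-chain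
theorem pvCatA_isSome : ∀ r ∈ pvPriority, (pvCatA r).isSome := by decide

-- A's loop returns the category of the first priority rule contained in xs
theorem pvLoopA_eq_find (xs : List String) : ∀ ps : List String,
    (∀ r ∈ ps, (pvCatA r).isSome) →
    pvLoopA xs ps =
      (match ps.find? (fun r => xs.contains r) with
       | some r => (pvCatA r).getD "PHONE_SUB"
       | none => "PHONE_SUB") := by
  intro ps
  induction ps with
  | nil => intro _; simp [pvLoopA]
  | cons p rest ih =>
    intro h
    have hfind : List.find? (fun r => xs.contains r) (p :: rest) =
        (if xs.contains p then some p else List.find? (fun r => xs.contains r) rest) := by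
      rw [List.find?_cons]
      cases hxs : xs.contains p <;> simp [hxs]
    by_cases hc : xs.contains p
    · rw [hfind, if_pos hc]
      obtain ⟨c, hcs⟩ := Option.isSome_iff_exists.mp (h p List.mem_cons_self)
      have hmem : p ∈ xs := by simpa using hc
      simp [pvLoopA, hmem, hcs]
    · rw [hfind, if_neg hc]
      have hmem : p ∉ xs := by simpa using hc
      have := ih (fun r hr => h r (List.mem_cons_of_mem _ hr))
      simpa [pvLoopA, hmem] using this

theorem pvCat_agree : ∀ i : Nat, i < 19 →
    (pvCatA (pvPriority.getD i "")).getD "PHONE_SUB" = pvCatT i := by decide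

theorem pvPriority_nodup : pvPriority.Nodup := by decide

-- A's result via the minimal priority index
theorem pvA_eq (xs : List String) :
    pvLoopA xs pvPriority =
      (if pvMin 19 xs = 19 then "PHONE_SUB" else pvCatT (pvMin 19 xs)) := by
  rw [pvLoopA_eq_find xs pvPriority pvCatA_isSome]
  obtain ⟨hle, hat, hbd⟩ := pvMin_props xs 19
  by_cases hm : pvMin 19 xs = 19
  · have hnone : pvPriority.find? (fun r => xs.contains r) = none := by
      rw [List.find?_eq_none]
      intro r hrP hc
      have hrx : r ∈ xs := by simpa using hc
      have h2 : pvIdx r < 19 := by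
        have := List.idxOf_lt_length_of_mem hrP
        simpa [pvIdx, pvPriority_length] using this
      have := hbd r hrx
      omega
    rw [hnone, if_pos hm]
  · have hlt : pvMin 19 xs < 19 := by omega
    rcases hat with h | ⟨r, hrx, hre⟩
    · omega
    have hL : pvIdx r < pvPriority.length := by
      rw [pvPriority_length]; omega
    have hget : pvPriority[pvIdx r]'hL = r := List.getElem_idxOf hL
    have hsome : pvPriority.find? (fun r => xs.contains r) = some r := by
      rw [List.find?_eq_some_iff_append]
      refine ⟨by simpa using hrx, pvPriority.take (pvIdx r), pvPriority.drop (pvIdx r + 1), ?_, ?_⟩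
      · conv_lhs => rw [← List.take_append_drop (pvIdx r) pvPriority]
        rw [← List.getElem_cons_drop hL, hget]
      · intro a ha
        obtain ⟨j, hj, rfl⟩ := List.mem_take_iff_getElem.mp ha
        have hidx : pvIdx pvPriority[j] = j := by
          unfold pvIdx
          exact pvPriority_nodup.idxOf_getElem _ (by omega)
        have hnotmem : pvPriority[j] ∉ xs := fun hax => by
          have := hbd _ hax; omega
        simpa using hnotmem
    rw [hsome, if_neg hm]
    have hgd : pvPriority.getD (pvMin 19 xs) "" = r := by
      rw [List.getD_eq_getElem _ _ (by rw [pvPriority_length]; omega)]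
      simp_rw [hre]
      exact hget
    have := pvCat_agree (pvMin 19 xs) hlt
    rw [hgd] at this
    exact this

-- ===== VERDICT (by name: the statement is the Claim_ definition above) =====
theorem classify_tajweed_diff_py_spec : Claim_equal_classify_tajweed_diff_py := by
  intro tajweed_rules _
  unfold Spec_classify_tajweed_diff_py
  match tajweed_rules with
  | none => rfl
  | some xs =>
    by_cases he : xs.isEmpty
    · simp [classify_tajweed_diff_py, classify_tajweed_diff_py_alt, he]
    · show (if xs.isEmpty then "PHONE_SUB" else pvLoopA xs pvPriority) = _
      have hB := pvFold_inv xs 19 (le_refl 19)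
      rw [if_pos rfl] at hB
      rw [if_neg he, pvA_eq xs]
      show _ = (if xs.isEmpty then "PHONE_SUB"
        else match xs.foldl pvStep none with
             | some b => b.2
             | none => "PHONE_SUB")
      rw [if_neg he, hB]
      by_cases hm : pvMin 19 xs = 19
      · rw [if_pos hm, if_pos hm]
      · rw [if_neg hm, if_neg hm]
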